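-- pv_equiv track=rewrite | github.com/Minerstove/Python | cs11/Prac10/Prac10a.py | optimal_matchups
-- ===== SOURCE A (Python) =====
-- def optimal_matchups(players):
--     s = sorted(players)
--     n = len(s)
--     if n < 2:
--         return 0
--
--     if n % 2 == 0:
--         return sum(s[i+1] - s[i] for i in range(0, n, 2))
--
--     best = 10**18
--     for skip in range(n):
--         arr = [s[i] for i in range(n) if i != skip]
--         total = sum(arr[i+1] - arr[i] for i in range(0, len(arr), 2))
--         best = min(best, total)
--     return best
-- ===== SOURCE B (Python) =====
-- def optimal_matchups(players):
--     s = sorted(players)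
--     n = len(s)
--     if n < 2:
--         return 0
--     if n % 2 == 0:
--         # pair-sum of a sorted even list == (sum of odd positions) - (sum of even positions)
--         return sum(s[1::2]) - sum(s[::2])
--     # odd: suf[j] = sum_{i >= j} (-1)**(i+1) * s[i]  (alternating suffix sums, built back to front)
--     rsuf = [0]
--     for j in range(n - 1, -1, -1):
--         term = s[j] if j % 2 == 1 else -s[j]
--         rsuf.append(term + rsuf[-1])
--     suf = rsuf[::-1]
--     best = 10 ** 18
--     for k in range(n):
--         best = min(best, suf[0] - suf[k] - suf[k + 1])
--     return best
-- ===== Notes on version B (the rewrite author's own statement) =====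
-- stated objective: alternative
-- what changed: Instead of rebuilding the skip-one list and re-summing its pairs for every candidate skip index, B computes one table of alternating suffix sums and reads each skip's pairing cost off that table at three positions in constant time; for even length it takes the difference of the two stride-2 slice sums instead of an index loop.
import Mathlib
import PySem

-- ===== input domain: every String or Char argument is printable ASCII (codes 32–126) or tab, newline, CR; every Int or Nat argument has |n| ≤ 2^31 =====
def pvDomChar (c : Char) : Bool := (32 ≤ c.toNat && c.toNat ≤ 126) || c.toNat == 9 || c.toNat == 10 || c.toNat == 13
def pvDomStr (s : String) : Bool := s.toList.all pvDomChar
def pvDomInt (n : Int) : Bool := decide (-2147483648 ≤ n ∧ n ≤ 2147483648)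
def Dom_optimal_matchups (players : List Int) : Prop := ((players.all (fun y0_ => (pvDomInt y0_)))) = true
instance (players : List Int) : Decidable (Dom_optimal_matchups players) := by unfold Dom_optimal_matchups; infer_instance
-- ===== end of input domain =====

-- B replaces A's rebuild-per-skip inner scan by one table of alternating suffix sums read at three points per skip, and stride-2 slice sums for even length.

-- ===== PORT A =====
def optimal_matchups (players : List Int) : Int :=
  let s := PySem.List.sorted players (fun x => x) false
  let n := s.length
  if n < 2 then 0
  else if n % 2 == 0 then
    ((PySem.List.pyRange 0 (n : Int) 2).map
      (fun i => PySem.List.pyGetD s (i + 1) 0 - PySem.List.pyGetD s i 0)).sum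
  else
    (PySem.List.pyRange 0 (n : Int) 1).foldl (fun best skip =>
      let arr := ((PySem.List.pyRange 0 (n : Int) 1).filter (fun i => i != skip)).map
        (fun i => PySem.List.pyGetD s i 0)
      let total := ((PySem.List.pyRange 0 (arr.length : Int) 2).map
        (fun i => PySem.List.pyGetD arr (i + 1) 0 - PySem.List.pyGetD arr i 0)).sum
      min best total) (10 ^ 18)

-- ===== PORT B =====
def optimal_matchups_alt (players : List Int) : Int :=
  let s := PySem.List.sorted players (fun x => x) false
  let n := s.length
  if n < 2 then 0
  else if n % 2 == 0 then
    ((PySem.List.slice? s (some 1) none 2).getD []).sum      -- sum(s[1::2])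
      - ((PySem.List.slice? s none none 2).getD []).sum      -- sum(s[::2])
  else
    let rsuf := (PySem.List.pyRange ((n : Int) - 1) (-1) (-1)).foldl
      (fun rsuf j =>
        let term := if PySem.Int.mod j 2 == 1 then PySem.List.pyGetD s j 0
                    else -(PySem.List.pyGetD s j 0)
        rsuf ++ [term + PySem.List.pyGetD rsuf (-1) 0]) [(0 : Int)]
    let suf := (PySem.List.slice? rsuf none none (-1)).getD []   -- rsuf[::-1]
    (PySem.List.pyRange 0 (n : Int) 1).foldl (fun best k =>
      min best (PySem.List.pyGetD suf 0 0 - PySem.List.pyGetD suf k 0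
                - PySem.List.pyGetD suf (k + 1) 0)) (10 ^ 18)

-- ===== PRECONDITION & SPEC =====
def Spec_optimal_matchups (players : List Int) (out : Int) : Prop := out = optimal_matchups_alt players
instance (players : List Int) (out : Int) : Decidable (Spec_optimal_matchups players out) := by unfold Spec_optimal_matchups; infer_instance

-- ===== CLAIM (what is proved, stated in full; the proofs are below) =====
def Claim_equal_optimal_matchups : Prop := ∀ (players : List Int), Dom_optimal_matchups players → Spec_optimal_matchups players (optimal_matchups players)

-- ===== LEMMAS AND PROOFS =====

-- alternating sum: altS σ l = σ*l₀ - σ*l₁ + σ*l₂ - …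
def altS : Int → List Int → Int
  | _, [] => 0
  | σ, x :: xs => σ * x + altS (-σ) xs

-- sign of index j in the top-level alternating sum Σ (-1)^(i+1) l[i]
def sgn (j : Nat) : Int := if j % 2 = 1 then 1 else -1

-- suffix alternating sum of s from index j
def sufF (s : List Int) (j : Nat) : Int := altS (sgn j) (s.drop j)

lemma altS_neg (σ : Int) (l : List Int) : altS (-σ) l = -altS σ l := by
  induction l generalizing σ with
  | nil => simp [altS]
  | cons x xs ih => simp [altS, ih, neg_neg]; ring

lemma altS_append (σ : Int) (a b : List Int) :
    altS σ (a ++ b) = altS σ a + altS (if a.length % 2 = 0 then σ else -σ) b := by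
  induction a generalizing σ with
  | nil => simp [altS]
  | cons x xs ih =>
    simp only [List.cons_append, altS, ih (-σ), List.length_cons]
    have h : (xs.length + 1) % 2 = 0 ↔ xs.length % 2 = 1 := by omega
    by_cases hx : xs.length % 2 = 0
    · have : (xs.length + 1) % 2 ≠ 0 := by omega
      simp [hx, this]
      ring
    · have : (xs.length + 1) % 2 = 0 := by omega
      simp [hx, this, neg_neg]
      ring

lemma sgn_succ (j : Nat) : sgn (j + 1) = -sgn j := by
  unfold sgn; by_cases h : j % 2 = 1
  · have : (j+1) % 2 ≠ 1 := by omega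
    simp [h, this]
  · have : (j+1) % 2 = 1 := by omega
    simp [h, this]

lemma sufF_step (s : List Int) (j : Nat) (h : j < s.length) :
    sufF s j = sgn j * s[j] + sufF s (j + 1) := by
  have hd : s.drop j = s[j] :: s.drop (j + 1) := List.drop_eq_getElem_cons h
  unfold sufF
  rw [hd]
  simp [altS, sgn_succ]

-- the even-index pair sum of A equals the top-level alternating sum, for even length
lemma map_range_getD_take (s : List Int) : ∀ (k : Nat), k ≤ s.length →
    ((List.range k).map (fun t => s.getD t 0)) = s.take k := by
  intro k
  induction k with
  | zero => simp
  | succ k ih =>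
    intro hk
    rw [List.range_succ, List.map_append, ih (by omega), List.take_add_one]
    have : k < s.length := by omega
    simp [List.getD, this]

lemma pyRange_two (m : Nat) :
    PySem.List.pyRange 0 (2 * (m : Int)) 2 = (List.range m).map (fun k => (2 * (k : Nat) : Int)) := by
  rw [PySem.List.pyRange_of_pos _ _ (by norm_num)]
  rcases Nat.eq_zero_or_pos m with hm | hm
  · simp [hm]
  · have h1 : (0 : Int) < 2 * (m : Int) := by positivity
    have h2 : ((2 * (m : Int) - 0 + 2 - 1) / 2).toNat = m := by omega
    simp only [if_pos h1, h2]
    exact List.map_congr_left (by intro k hk; ring)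

lemma pyGetD_natCast_succ (l : List Int) (a : Nat) :
    PySem.List.pyGetD l ((a : Int) + 1) 0 = l.getD (a + 1) 0 := by
  have h : ((a : Int) + 1) = (((a + 1 : Nat)) : Int) := by push_cast; ring
  rw [h, PySem.List.pyGetD_natCast]

lemma pairSum_eq_altS : ∀ (m : Nat) (l : List Int), l.length = 2 * m →
    ((PySem.List.pyRange 0 (l.length : Int) 2).map
      (fun i => PySem.List.pyGetD l (i + 1) 0 - PySem.List.pyGetD l i 0)).sum
    = altS (-1) l := by
  intro m
  induction m with
  | zero =>
    intro l hl
    have : l = [] := List.eq_nil_of_length_eq_zero (by omega)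
    subst this
    have h0 : PySem.List.pyRange 0 (([] : List Int).length : Int) 2 = [] := by decide
    rw [h0]
    simp [altS]
  | succ m ih =>
    intro l hl
    match l, hl with
    | x :: y :: t, hl =>
      have ht : t.length = 2 * m := by simp at hl; omega
      have hcast : ((x :: y :: t).length : Int) = 2 * ((m + 1 : Nat) : Int) := by
        simp [ht]; ring
      rw [hcast, pyRange_two, List.map_map, List.range_succ_eq_map, List.map_cons, List.map_map,
        List.sum_cons]
      have hhead : (((fun i => PySem.List.pyGetD (x :: y :: t) (i + 1) 0 -
          PySem.List.pyGetD (x :: y :: t) i 0) ∘ fun k => (2 * (k : Nat) : Int)) 0) = y - x := by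
        have e0 : (2 * ((0 : Nat) : Int)) = ((0 : Nat) : Int) := by norm_num
        simp only [Function.comp, e0, pyGetD_natCast_succ, PySem.List.pyGetD_natCast]
        simp [List.getD]
      have htail : ∀ k : Nat,
          (((fun i => PySem.List.pyGetD (x :: y :: t) (i + 1) 0 -
            PySem.List.pyGetD (x :: y :: t) i 0) ∘ fun k => (2 * (k : Nat) : Int)) ∘ Nat.succ) k
          = ((fun i => PySem.List.pyGetD t (i + 1) 0 - PySem.List.pyGetD t i 0) ∘
              fun k => (2 * (k : Nat) : Int)) k := by
        intro k
        have e0 : (2 * ((Nat.succ k : Nat) : Int)) = ((2 * k + 2 : Nat) : Int) := by push_cast; ring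
        have f0 : (2 * ((k : Nat) : Int)) = ((2 * k : Nat) : Int) := by push_cast; ring
        simp only [Function.comp, e0, f0, pyGetD_natCast_succ, PySem.List.pyGetD_natCast]
        simp [List.getD]
      rw [List.map_congr_left (fun k _ => htail k)]
      have hrw : ((PySem.List.pyRange 0 ((2 * m : Nat) : Int) 2).map
          (fun i => PySem.List.pyGetD t (i + 1) 0 - PySem.List.pyGetD t i 0)).sum = altS (-1) t := by
        rw [← ht]; exact ih t ht
      have hcast2 : ((2 * m : Nat) : Int) = 2 * ((m : Nat) : Int) := by push_cast; ring
      rw [hcast2, pyRange_two, List.map_map] at hrw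
      rw [hhead, hrw]
      simp [altS]
      ring

-- A's arr comprehension is take k ++ drop (k+1)
lemma arr_eq_erase (s : List Int) (k : Nat) (hk : k < s.length) :
    ((PySem.List.pyRange 0 (s.length : Int) 1).filter (fun i => i != (k : Int))).map
      (fun i => PySem.List.pyGetD s i 0)
    = s.take k ++ s.drop (k + 1) := by
  rw [PySem.List.pyRange_one_append 0 (k : Int) (s.length : Int) (by positivity)
    (by exact_mod_cast hk.le), List.filter_append, List.map_append]
  have h1 : (PySem.List.pyRange 0 (k : Int) 1).filter (fun i => i != (k : Int))
      = PySem.List.pyRange 0 (k : Int) 1 := by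
    rw [List.filter_eq_self]
    intro a ha
    rw [PySem.List.mem_pyRange_one] at ha
    simp only [bne_iff_ne, ne_eq]
    omega
  have h2 : PySem.List.pyRange (k : Int) (s.length : Int) 1
      = (k : Int) :: PySem.List.pyRange ((k : Int) + 1) (s.length : Int) 1 :=
    PySem.List.pyRange_one_cons (by exact_mod_cast hk)
  have h3 : (PySem.List.pyRange ((k : Int) + 1) (s.length : Int) 1).filter (fun i => i != (k : Int))
      = PySem.List.pyRange ((k : Int) + 1) (s.length : Int) 1 := by
    rw [List.filter_eq_self]
    intro a ha
    rw [PySem.List.mem_pyRange_one] at ha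
    simp only [bne_iff_ne, ne_eq]
    omega
  rw [h1, h2, List.filter_cons]
  simp only [bne_self_eq_false, h3]
  congr 1
  · -- take part
    rw [PySem.List.pyRange_one]
    simp only [List.map_map, Int.sub_zero, Int.toNat_natCast]
    have : ∀ t : Nat, ((fun i => PySem.List.pyGetD s i 0) ∘ fun j : Nat => (0 : Int) + (j : Int)) t
        = s.getD t 0 := by
      intro t
      simp [PySem.List.pyGetD_natCast]
    rw [List.map_congr_left (fun t _ => this t)]
    exact map_range_getD_take s k hk.le
  · -- drop part
    have hcast : ((k : Int) + 1) = (((k + 1 : Nat)) : Int) := by push_cast; ring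
    rw [hcast]
    simp only [Bool.false_eq_true, if_false]
    rw [PySem.List.map_pyGetD_pyRange' s 0 (Int.natCast_nonneg _)]
    simp

-- alternating sum of the list with index k removed, via suffix sums
lemma sgn_eq_ite (k : Nat) : (if k % 2 = 0 then (-1 : Int) else 1) = sgn k := by
  unfold sgn
  rcases Nat.even_or_odd k with h | h
  · have h0 : k % 2 = 0 := Nat.even_iff.mp h
    simp [h0]
  · have h1 : k % 2 = 1 := Nat.odd_iff.mp h
    simp [h1]

lemma altS_erase (s : List Int) (k : Nat) (hk : k < s.length) :
    altS (-1) (s.take k ++ s.drop (k + 1)) = sufF s 0 - sufF s k - sufF s (k + 1) := by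
  have hlen : (s.take k).length = k := List.length_take_of_le hk.le
  have hzero : sufF s 0 = altS (-1) s := by
    unfold sufF sgn
    simp
  have hsplit : altS (-1) s = altS (-1) (s.take k) + sufF s k := by
    have h := altS_append (-1) (s.take k) (s.drop k)
    rw [List.take_append_drop, hlen] at h
    simp only [neg_neg] at h
    rw [sgn_eq_ite k] at h
    exact h
  have hmain := altS_append (-1) (s.take k) (s.drop (k + 1))
  rw [hlen] at hmain
  simp only [neg_neg] at hmain
  rw [sgn_eq_ite k] at hmain
  have hneg : altS (sgn k) (s.drop (k + 1)) = -sufF s (k + 1) := by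
    unfold sufF
    rw [sgn_succ, altS_neg (sgn k) (s.drop (k + 1))]
    ring
  have htake : altS (-1) (s.take k) = sufF s 0 - sufF s k := by
    rw [hzero]; linarith
  rw [hmain, hneg, htake]
  ring

-- B's fold builds exactly the table of suffix alternating sums
def stepB (s : List Int) (rsuf : List Int) (j : Int) : List Int :=
  rsuf ++ [(if PySem.Int.mod j 2 == 1 then PySem.List.pyGetD s j 0
            else -(PySem.List.pyGetD s j 0)) + PySem.List.pyGetD rsuf (-1) 0]

lemma suf_step_val (s : List Int) (j : Nat) (hj : j < s.length) :
    (if PySem.Int.mod (j : Int) 2 == 1 then PySem.List.pyGetD s (j : Int) 0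
     else -(PySem.List.pyGetD s (j : Int) 0)) + sufF s (j + 1) = sufF s j := by
  have hmod : PySem.Int.mod (j : Int) 2 = ((j % 2 : Nat) : Int) := by
    exact_mod_cast PySem.Int.mod_natCast j 2
  have hget : PySem.List.pyGetD s (j : Int) 0 = s[j] := by
    rw [PySem.List.pyGetD_natCast]
    exact List.getD_eq_getElem s 0 hj
  rw [sufF_step s j hj]
  rw [hmod, hget]
  unfold sgn
  by_cases hpar : j % 2 = 1
  · simp [hpar]
  · have h0 : j % 2 = 0 := by omega
    simp [h0]

lemma suf_build_aux (s : List Int) : ∀ (j : Nat), j ≤ s.length →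
    (PySem.List.pyRange ((j : Int) - 1) (-1) (-1)).foldl (stepB s)
      (((List.range (s.length + 1 - j)).map (fun t => sufF s (j + t))).reverse)
    = ((List.range (s.length + 1)).map (sufF s)).reverse := by
  intro j
  induction j with
  | zero =>
    intro _
    rw [show ((0 : Nat) : Int) - 1 = -1 by norm_num, PySem.List.pyRange_neg_one_eq_nil le_rfl]
    simp
  | succ j ih =>
    intro hj
    have hjlt : j < s.length := by omega
    have hcons : PySem.List.pyRange (((j + 1 : Nat) : Int) - 1) (-1) (-1)
        = (j : Int) :: PySem.List.pyRange ((j : Int) - 1) (-1) (-1) := by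
      have h1 : (((j + 1 : Nat) : Int) - 1) = (j : Int) := by push_cast; ring
      rw [h1]
      exact PySem.List.pyRange_neg_one_cons (by omega)
    rw [hcons, List.foldl_cons]
    have hacc : ((List.range (s.length + 1 - (j + 1))).map (fun t => sufF s (j + 1 + t)))
        = sufF s (j + 1) :: (List.range (s.length - (j + 1))).map (fun t => sufF s (j + 1 + (t + 1))) := by
      rw [show s.length + 1 - (j + 1) = (s.length - (j + 1)) + 1 from by omega,
        List.range_succ_eq_map, List.map_cons, List.map_map]
      simp [Function.comp_def, Nat.succ_eq_add_one]
    have hstep : stepB s (((List.range (s.length + 1 - (j + 1))).map (fun t => sufF s (j + 1 + t))).reverse) ((j : Nat) : Int)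
        = ((List.range (s.length + 1 - j)).map (fun t => sufF s (j + t))).reverse := by
      have hmap2 : (List.range (s.length - j)).map ((fun t => sufF s (j + t)) ∘ Nat.succ)
          = (List.range (s.length + 1 - (j + 1))).map (fun t => sufF s (j + 1 + t)) := by
        rw [show s.length + 1 - (j + 1) = s.length - j from by omega]
        apply List.map_congr_left
        intro t _
        simp only [Function.comp_def, Nat.succ_eq_add_one]
        congr 1
        omega
      unfold stepB
      rw [hacc, List.reverse_cons, PySem.List.pyGetD_neg_one_append_singleton,
        suf_step_val s j hjlt]
      rw [show s.length + 1 - j = (s.length - j) + 1 from by omega,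
        List.range_succ_eq_map, List.map_cons, List.map_map, List.reverse_cons,
        hmap2, hacc, List.reverse_cons]
      norm_num
    rw [hstep]
    exact ih (by omega)

lemma suf_build (s : List Int) :
    (PySem.List.slice?
      ((PySem.List.pyRange ((s.length : Int) - 1) (-1) (-1)).foldl
        (fun rsuf j =>
          let term := if PySem.Int.mod j 2 == 1 then PySem.List.pyGetD s j 0
                      else -(PySem.List.pyGetD s j 0)
          rsuf ++ [term + PySem.List.pyGetD rsuf (-1) 0]) [(0 : Int)])
      none none (-1)).getD []
    = (List.range (s.length + 1)).map (sufF s) := by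
  have hfun : (fun (rsuf : List Int) (j : Int) =>
      let term := if PySem.Int.mod j 2 == 1 then PySem.List.pyGetD s j 0
                  else -(PySem.List.pyGetD s j 0)
      rsuf ++ [term + PySem.List.pyGetD rsuf (-1) 0]) = stepB s := rfl
  rw [hfun]
  have h := suf_build_aux s s.length le_rfl
  have hinit : (((List.range (s.length + 1 - s.length)).map (fun t => sufF s (s.length + t))).reverse)
      = [(0 : Int)] := by
    rw [show s.length + 1 - s.length = 1 from by omega]
    simp [sufF, altS]
  rw [hinit] at h
  rw [h, PySem.List.slice?_none_none_neg_one, Option.getD_some, List.reverse_reverse]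

-- B's even-case slices: s[::2] and s[1::2] as index maps
lemma slice2_evens (l : List Int) :
    PySem.List.slice? l none none 2
    = some ((List.range ((l.length + 1) / 2)).map (fun k => l.getD (2 * k) 0)) := by
  simp only [PySem.List.slice?, PySem.List.sliceIndices]
  norm_num
  have hcount : (if 0 < l.length then (((l.length : Int) + 2 - 1) / 2).toNat else 0)
      = (l.length + 1) / 2 := by
    split <;> omega
  rw [hcount]
  apply List.filterMap_eq_map_iff_forall_eq_some.mpr
  intro x hx
  rw [List.mem_range] at hx
  have h2 : 2 * x < l.length := by omega
  have hidx : ((2 * (x : Int))).toNat = 2 * x := by omega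
  rw [hidx, List.getElem?_eq_getElem h2]
  simp [List.getD, List.getElem?_eq_getElem h2]

lemma slice2_odds (l : List Int) (h : 0 < l.length) :
    PySem.List.slice? l (some 1) none 2
    = some ((List.range (l.length / 2)).map (fun k => l.getD (2 * k + 1) 0)) := by
  simp only [PySem.List.slice?, PySem.List.sliceIndices]
  norm_num
  have hmin : min (1 : Int) (l.length : Int) = 1 := by omega
  rw [hmin]
  have hcount : (if 1 < l.length then (((l.length : Int) - 1 + 2 - 1) / 2).toNat else 0)
      = l.length / 2 := by
    split <;> omega
  rw [hcount]
  apply List.filterMap_eq_map_iff_forall_eq_some.mpr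
  intro x hx
  rw [List.mem_range] at hx
  have h2 : 2 * x + 1 < l.length := by omega
  have hidx : ((1 + 2 * (x : Int))).toNat = 2 * x + 1 := by omega
  rw [hidx, List.getElem?_eq_getElem h2]
  simp [List.getD, List.getElem?_eq_getElem h2]

-- odd-position sum minus even-position sum is the alternating sum, for even length
lemma oddsum_sub_evensum (l : List Int) (m : Nat) (hl : l.length = 2 * m) :
    ((List.range (l.length / 2)).map (fun k => l.getD (2 * k + 1) 0)).sum
      - ((List.range ((l.length + 1) / 2)).map (fun k => l.getD (2 * k) 0)).sum
    = altS (-1) l := by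
  induction m generalizing l with
  | zero =>
    have : l = [] := List.eq_nil_of_length_eq_zero (by omega)
    subst this
    simp [altS]
  | succ m ih =>
    match l, hl with
    | x :: y :: t, hl =>
      have ht : t.length = 2 * m := by simp at hl; omega
      have hq1 : (x :: y :: t).length / 2 = t.length / 2 + 1 := by simp; omega
      have hq2 : ((x :: y :: t).length + 1) / 2 = (t.length + 1) / 2 + 1 := by simp; omega
      rw [hq1, hq2, List.range_succ_eq_map, List.range_succ_eq_map, List.map_cons, List.map_cons,
        List.sum_cons, List.sum_cons, List.map_map, List.map_map]
      have hodd : ∀ k : Nat, ((fun k => (x :: y :: t).getD (2 * k + 1) 0) ∘ Nat.succ) k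
          = (fun k => t.getD (2 * k + 1) 0) k := by
        intro k
        simp only [Function.comp_def, Nat.succ_eq_add_one]
        rw [show 2 * (k + 1) + 1 = (2 * k + 1) + 1 + 1 from by ring]
        simp [List.getD]
      have heven : ∀ k : Nat, ((fun k => (x :: y :: t).getD (2 * k) 0) ∘ Nat.succ) k
          = (fun k => t.getD (2 * k) 0) k := by
        intro k
        simp only [Function.comp_def, Nat.succ_eq_add_one]
        rw [show 2 * (k + 1) = 2 * k + 1 + 1 from by ring]
        simp [List.getD]
      rw [List.map_congr_left (fun k _ => hodd k), List.map_congr_left (fun k _ => heven k)]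
      have := ih t ht
      simp only [List.getD] at this ⊢
      simp [altS]
      linarith [ih t ht]

-- ===== VERDICT (by name: the statement is the Claim_ definition above) =====
theorem optimal_matchups_spec : Claim_equal_optimal_matchups := by
  intro players _
  unfold Spec_optimal_matchups
  simp only [optimal_matchups, optimal_matchups_alt]
  set s : List Int := PySem.List.sorted players (fun x => x) false with hs
  by_cases h2 : s.length < 2
  · simp [h2]
  · simp only [h2, if_false]
    by_cases hev : s.length % 2 = 0
    · rw [if_pos (by simpa using hev), if_pos (by simpa using hev)]
      rw [pairSum_eq_altS (s.length / 2) s (by omega)]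
      rw [slice2_odds s (by omega), slice2_evens s]
      simp only [Option.getD_some]
      rw [oddsum_sub_evensum s (s.length / 2) (by omega)]
    · rw [if_neg (by simpa using hev), if_neg (by simpa using hev)]
      rw [suf_build s]
      apply PySem.List.foldl_congr_mem
      intro acc i hi
      rw [PySem.List.mem_pyRange_one] at hi
      obtain ⟨hi0, hin⟩ := hi
      have hki : i = (i.toNat : Int) := by omega
      rw [hki]
      set k := i.toNat with hk
      have hkn : k < s.length := by omega
      congr 1
      rw [arr_eq_erase s k hkn]
      have hlen : (s.take k ++ s.drop (k + 1)).length = 2 * (s.length / 2) := by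
        simp [List.length_take, List.length_drop]
        omega
      rw [pairSum_eq_altS (s.length / 2) _ hlen, altS_erase s k hkn]
      rw [PySem.List.pyGetD_zero, PySem.List.getD_map_range (sufF s) _ 0 0 (by omega)]
      rw [PySem.List.pyGetD_natCast, PySem.List.getD_map_range (sufF s) _ k 0 (by omega)]
      rw [pyGetD_natCast_succ, PySem.List.getD_map_range (sufF s) _ (k + 1) 0 (by omega)]
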